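-- pv_equiv track=rewrite | github.com/ChiSha2019/USACO_Solution_Python | Bronze/social_distancing1/scoial_distance1.py | find_smallest_interior_gap
-- ===== SOURCE A (Python) =====
-- def find_smallest_interior_gap(stall_list):
--     smallest_gap = len(stall_list)
--     current_start = -1
--     list_length = len(stall_list)
--     for i in range(0, list_length):
--         if stall_list[i] == "1":
--             if current_start != -1 and i - current_start < smallest_gap:
--                 smallest_gap = i - current_start
--             current_start = i
--     return smallest_gap
-- ===== SOURCE B (Python) =====
-- def find_smallest_interior_gap(stall_list):
--     pos = [i for i, s in enumerate(stall_list) if s == "1"]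
--     if len(pos) < 2:
--         return len(stall_list)
--     return min(b - a for a, b in zip(pos, pos[1:]))
-- ===== Notes on version B (the rewrite author's own statement) =====
-- stated objective: idiomatic
-- what changed: B replaces the fused index loop with last-seen state by an index-collection pass over enumerate followed by a min over consecutive differences of the position list.
import Mathlib
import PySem

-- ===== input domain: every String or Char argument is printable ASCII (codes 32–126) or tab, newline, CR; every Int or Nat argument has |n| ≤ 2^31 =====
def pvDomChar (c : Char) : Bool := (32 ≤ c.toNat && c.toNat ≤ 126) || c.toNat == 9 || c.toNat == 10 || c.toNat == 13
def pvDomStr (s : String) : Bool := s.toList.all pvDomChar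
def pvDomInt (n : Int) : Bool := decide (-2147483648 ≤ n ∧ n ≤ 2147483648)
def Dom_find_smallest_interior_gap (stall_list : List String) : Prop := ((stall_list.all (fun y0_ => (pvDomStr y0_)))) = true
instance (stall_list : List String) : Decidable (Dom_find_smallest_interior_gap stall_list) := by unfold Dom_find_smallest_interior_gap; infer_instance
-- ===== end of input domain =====

-- B collects the '1'-positions first and takes the min of consecutive differences,
-- instead of A's fused index loop carrying last-seen-position state (objective: idiomatic).

-- ===== PORT A =====
def find_smallest_interior_gap (stall_list : List String) : Int :=
  let list_length : Int := stall_list.length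
  ((PySem.List.pyRange 0 list_length 1).foldl
    (fun (st : Int × Int) i =>
      if PySem.List.pyGetD stall_list i "" == "1" then
        (if st.2 ≠ -1 ∧ i - st.2 < st.1 then i - st.2 else st.1, i)
      else st)
    (list_length, -1)).1

-- ===== PORT B =====
def find_smallest_interior_gap_alt (stall_list : List String) : Int :=
  let pos := ((PySem.List.enumerate stall_list 0).filter (fun p => p.2 == "1")).map (fun p => p.1)
  if pos.length < 2 then (stall_list.length : Int)
  else (PySem.List.min? ((pos.zip pos.tail).map (fun p => p.2 - p.1)) (fun x => x)).getD (stall_list.length : Int)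

-- ===== PRECONDITION & SPEC =====
def Spec_find_smallest_interior_gap (stall_list : List String) (out : Int) : Prop := out = find_smallest_interior_gap_alt stall_list
instance (stall_list : List String) (out : Int) : Decidable (Spec_find_smallest_interior_gap stall_list out) := by unfold Spec_find_smallest_interior_gap; infer_instance

-- ===== CLAIM (what is proved, stated in full; the proofs are below) =====
def Claim_equal_find_smallest_interior_gap : Prop := ∀ (stall_list : List String), Dom_find_smallest_interior_gap stall_list → Spec_find_smallest_interior_gap stall_list (find_smallest_interior_gap stall_list)

-- ===== LEMMAS AND PROOFS =====

-- A's loop body, restricted to the '1'-positions (the state is (smallest_gap, current_start)).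
def gapStep (st : Int × Int) (i : Int) : Int × Int :=
  (if st.2 ≠ -1 ∧ i - st.2 < st.1 then i - st.2 else st.1, i)

-- Once current_start is a real position, A's fold computes the running min of g over consecutive differences.
theorem gap_fold_min (ps : List Int) (g c : Int) (hc : c ≠ -1) (hps : ∀ x ∈ ps, x ≠ -1) :
    (ps.foldl gapStep (g, c)).1
      = (((c :: ps).zip ps).map (fun p => p.2 - p.1)).foldl min g := by
  induction ps generalizing g c with
  | nil => rfl
  | cons i t ih =>
      have hi : i ≠ -1 := hps i (by simp)
      have hstep : gapStep (g, c) i = (min g (i - c), i) := by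
        simp only [gapStep, hc, ne_eq, not_false_iff, true_and]
        congr 1
        rcases le_or_gt g (i - c) with h | h
        · simp [min_eq_left h]; omega
        · simp [min_eq_right (le_of_lt h), h]
      simp only [List.foldl_cons, hstep, List.zip_cons_cons, List.map_cons]
      exact ih (min g (i - c)) i hi (fun x hx => hps x (by simp [hx]))

-- every collected position satisfies 0 ≤ p < len
theorem pos_bounds (xs : List String) (p : Int)
    (hp : p ∈ ((PySem.List.enumerate xs 0).filter (fun q => q.2 == "1")).map (fun q => q.1)) :
    0 ≤ p ∧ p < (xs.length : Int) := by
  rcases List.mem_map.1 hp with ⟨q, hq, rfl⟩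
  rcases (PySem.List.mem_enumerate_iff xs 0 q).1 (List.mem_filter.1 hq).1 with ⟨k, hk, rfl⟩
  simp
  omega

theorem find_smallest_interior_gap_eq_alt (xs : List String) :
    find_smallest_interior_gap xs = find_smallest_interior_gap_alt xs := by
  have hA : find_smallest_interior_gap xs
      = ((((PySem.List.enumerate xs 0).filter (fun p => p.2 == "1")).map (fun p => p.1)).foldl
          gapStep ((xs.length : Int), -1)).1 := by
    unfold find_smallest_interior_gap
    rw [show PySem.List.enumerate xs 0 = PySem.List.enumerate xs from rfl,
        PySem.List.enumerate_eq_map_pyRange xs "", List.filter_map, List.map_map,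
        List.foldl_map, List.foldl_filter]
    rfl
  set pos := ((PySem.List.enumerate xs 0).filter (fun p => p.2 == "1")).map (fun p => p.1) with hpos
  have hb : ∀ p ∈ pos, 0 ≤ p ∧ p < (xs.length : Int) := fun p hp => pos_bounds xs p hp
  unfold find_smallest_interior_gap_alt
  rw [hA, ← hpos]
  match pos, hb with
  | [], _ => simp
  | [p], _ => simp [gapStep]
  | p0 :: p1 :: rest, hb =>
    have h0 : 0 ≤ p0 ∧ p0 < (xs.length : Int) := hb p0 (by simp)
    have h1 : 0 ≤ p1 ∧ p1 < (xs.length : Int) := hb p1 (by simp)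
    have hne : ∀ x ∈ p1 :: rest, x ≠ -1 := by
      intro x hx
      have := hb x (by simp [List.mem_cons.1 hx |>.elim (fun h => Or.inr (Or.inl h)) (fun h => Or.inr (Or.inr h))])
      omega
    have hfirst : gapStep ((xs.length : Int), -1) p0 = ((xs.length : Int), p0) := by
      simp [gapStep]
    rw [List.foldl_cons, hfirst, gap_fold_min (p1 :: rest) (xs.length : Int) p0 (by omega) hne]
    have hm : min (xs.length : Int) (p1 - p0) = p1 - p0 := by omega
    simp [PySem.List.min?_id_cons, hm]

-- ===== VERDICT (by name: the statement is the Claim_ definition above) =====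
theorem find_smallest_interior_gap_spec : Claim_equal_find_smallest_interior_gap := by
  intro xs _
  exact find_smallest_interior_gap_eq_alt xs
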